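-- pv_equiv track=rewrite | github.com/bkusenda/simpleland | simpleland/contentbundles/survival_objects.py | get_types
-- ===== SOURCE A (Python) =====
-- type_tree = {
--     'physical_object': None,
--     'plant': 'physical_object',
--     'tree': 'plant',
--     'bush': 'plant',
--     'animal': 'animate',
--     'monster': 'animal',
--     'human': 'animal',
--     'deer': 'animal',
--     'rock': 'physical_object',
-- }
--
-- def get_types(cur_type):
--     all_types = set()
--     done = False
--     while not done:
--         all_types.add(cur_type)
--         new_type = type_tree.get(cur_type)
--         if new_type is None:
--             break
--         else:
--             cur_type = new_type
--     return all_types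
-- ===== SOURCE B (Python) =====
-- type_tree = {
--     'physical_object': None,
--     'plant': 'physical_object',
--     'tree': 'plant',
--     'bush': 'plant',
--     'animal': 'animate',
--     'monster': 'animal',
--     'human': 'animal',
--     'deer': 'animal',
--     'rock': 'physical_object',
-- }
--
-- def get_types(cur_type):
--     parent = type_tree.get(cur_type)
--     if parent is None:
--         return {cur_type}
--     return {cur_type} | get_types(parent)
-- ===== Notes on version B (the rewrite author's own statement) =====
-- stated objective: simpler
-- what changed: Replaced the while loop with a mutable set accumulator and break/done flag by a direct recursion over the parent pointer that returns {cur_type} unioned with the ancestors of the parent.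
import Mathlib
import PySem

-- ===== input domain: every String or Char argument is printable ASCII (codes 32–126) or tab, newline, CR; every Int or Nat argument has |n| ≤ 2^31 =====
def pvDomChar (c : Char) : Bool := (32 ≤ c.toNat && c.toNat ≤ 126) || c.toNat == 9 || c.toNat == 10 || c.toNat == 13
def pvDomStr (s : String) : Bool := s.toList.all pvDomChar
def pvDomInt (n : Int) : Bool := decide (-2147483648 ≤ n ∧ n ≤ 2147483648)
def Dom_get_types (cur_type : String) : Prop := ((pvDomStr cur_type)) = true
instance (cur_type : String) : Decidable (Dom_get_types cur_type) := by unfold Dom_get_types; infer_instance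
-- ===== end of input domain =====

-- B replaces A's while loop with a mutable set / done flag by a direct recursion
-- on the parent pointer returning {cur_type} | get_types(parent)  (objective: simpler).

-- ===== PORT A =====
-- the module constant type_tree (values are str or None)
def typeTree : PySem.Dict String (Option String) := PySem.Dict.ofList
  [("physical_object", none), ("plant", some "physical_object"), ("tree", some "plant"),
   ("bush", some "plant"), ("animal", some "animate"), ("monster", some "animal"),
   ("human", some "animal"), ("deer", some "animal"), ("rock", some "physical_object")]

-- the while loop; fuel only makes the recursion total (every chain in typeTree has length < 10)
def get_types_loop (fuel : Nat) (all_types : PySem.Set String) (cur_type : String) : PySem.Set String :=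
  match fuel with
  | 0 => all_types
  | f + 1 =>
    let all_types := PySem.Set.add all_types cur_type
    match (typeTree.get? cur_type).join with   -- type_tree.get(cur_type): None if absent or stored None
    | none => all_types
    | some new_type => get_types_loop f all_types new_type

def get_types (cur_type : String) : List String :=
  get_types_loop 10 PySem.Set.empty cur_type

-- ===== PORT B =====
-- recursive: {cur_type} if no parent, else {cur_type} | get_types(parent); same fuel-for-totality
def get_types_alt_rec (fuel : Nat) (cur_type : String) : PySem.Set String :=
  match fuel, (typeTree.get? cur_type).join with
  | _, none => PySem.Set.ofList [cur_type]
  | 0, some _ => PySem.Set.ofList [cur_type]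
  | f + 1, some parent => PySem.Set.union (PySem.Set.ofList [cur_type]) (get_types_alt_rec f parent)

def get_types_alt (cur_type : String) : List String :=
  get_types_alt_rec 10 cur_type

-- ===== PRECONDITION & SPEC =====
def Spec_get_types (cur_type : String) (out : List String) : Prop := out = get_types_alt cur_type
instance (cur_type : String) (out : List String) : Decidable (Spec_get_types cur_type out) := by unfold Spec_get_types; infer_instance

-- ===== CLAIM (what is proved, stated in full; the proofs are below) =====
def Claim_equal_get_types : Prop := ∀ (cur_type : String), Dom_get_types cur_type → Spec_get_types cur_type (get_types cur_type)

-- ===== LEMMAS AND PROOFS =====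
theorem notkey_lookup (c : String)
    (h1 : c ≠ "physical_object") (h2 : c ≠ "plant") (h3 : c ≠ "tree") (h4 : c ≠ "bush")
    (h5 : c ≠ "animal") (h6 : c ≠ "monster") (h7 : c ≠ "human") (h8 : c ≠ "deer")
    (h9 : c ≠ "rock") : typeTree.get? c = none := by
  have ht : typeTree = PySem.Dict.mk
      [("physical_object", none), ("plant", some "physical_object"), ("tree", some "plant"),
       ("bush", some "plant"), ("animal", some "animate"), ("monster", some "animal"),
       ("human", some "animal"), ("deer", some "animal"), ("rock", some "physical_object")] := by rfl
  rw [ht]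
  simp [PySem.Dict.get?, beq_iff_eq,
        Ne.symm h1, Ne.symm h2, Ne.symm h3, Ne.symm h4, Ne.symm h5, Ne.symm h6,
        Ne.symm h7, Ne.symm h8, Ne.symm h9]

-- ===== VERDICT (by name: the statement is the Claim_ definition above) =====
theorem get_types_spec : Claim_equal_get_types := by
  intro c _
  unfold Spec_get_types
  by_cases h1 : c = "physical_object"; · subst h1; decide
  by_cases h2 : c = "plant"; · subst h2; decide
  by_cases h3 : c = "tree"; · subst h3; decide
  by_cases h4 : c = "bush"; · subst h4; decide
  by_cases h5 : c = "animal"; · subst h5; decide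
  by_cases h6 : c = "monster"; · subst h6; decide
  by_cases h7 : c = "human"; · subst h7; decide
  by_cases h8 : c = "deer"; · subst h8; decide
  by_cases h9 : c = "rock"; · subst h9; decide
  have hl := notkey_lookup c h1 h2 h3 h4 h5 h6 h7 h8 h9
  show get_types_loop 10 PySem.Set.empty c = get_types_alt_rec 10 c
  unfold get_types_loop get_types_alt_rec
  simp [hl, PySem.Set.add, PySem.Set.ofList, PySem.Set.empty, PySem.Set.contains]
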